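-- pv_equiv track=rewrite | github.com/SimonGuilbert/Sibra | ArbresDecision/progPython.py | dicAttributs
-- ===== SOURCE A (Python) =====
-- def dicAttributs(donnees):
--     dic = {}
--     for i in range(len(donnees[0])-1):
--         dic[donnees[0][i]] = [donnees[1][i]]
--         for j in range(1,len(donnees)):
--             if donnees[j][i] not in dic[donnees[0][i]] and donnees[j][i] != "?":
--                 dic[donnees[0][i]].append(donnees[j][i])
--     return dic
-- ===== SOURCE B (Python) =====
-- def dicAttributs(donnees):
--     m = len(donnees[0]) - 1
--     if len(donnees) < 2 or m < 1:
--         return {}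
--     # one row-major pass: per column keep (ordered values, seen-set)
--     state = [([v], {v}) for v in donnees[1][:m]]
--     for row in donnees[2:]:
--         state = [((vals + [v], seen | {v}) if v != "?" and v not in seen else (vals, seen))
--                  for (vals, seen), v in zip(state, row)]
--     return {h: vals for h, (vals, _) in zip(donnees[0], state)}
-- ===== Notes on version B (the rewrite author's own statement) =====
-- stated objective: alternative
-- what changed: A fills the dict column by column with a nested j-loop whose membership test rescans the growing value list; B makes one row-major pass over the data rows keeping, per column, the ordered value list plus a seen-set, and builds the dict once at the end.
import Mathlib
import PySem

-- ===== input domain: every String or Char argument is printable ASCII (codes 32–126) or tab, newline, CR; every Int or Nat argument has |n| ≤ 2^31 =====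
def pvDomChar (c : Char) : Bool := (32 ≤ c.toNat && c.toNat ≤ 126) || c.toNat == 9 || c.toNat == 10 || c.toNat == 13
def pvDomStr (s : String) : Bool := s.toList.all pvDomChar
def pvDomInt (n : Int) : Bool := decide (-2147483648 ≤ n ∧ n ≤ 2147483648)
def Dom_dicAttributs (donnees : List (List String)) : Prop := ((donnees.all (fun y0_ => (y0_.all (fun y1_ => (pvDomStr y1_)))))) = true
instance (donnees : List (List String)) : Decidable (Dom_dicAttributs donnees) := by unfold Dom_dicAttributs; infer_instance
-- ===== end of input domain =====

-- B replaces A's column-by-column nested loops (inner membership scan of a growing list) by a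
-- single row-major pass keeping per column the ordered value list plus a seen-set, building the
-- dict once at the end (objective: alternative).


-- ===== PORT A =====
def dicAttributs (donnees : List (List String)) : List (String × List String) :=
  (PySem.List.pyRange 0 (((PySem.List.pyGetD donnees 0 []).length : Int) - 1) |>.foldl
    (fun dic i =>
      let key := PySem.List.pyGetD (PySem.List.pyGetD donnees 0 []) i ""
      let dic1 := PySem.Dict.insert dic key [PySem.List.pyGetD (PySem.List.pyGetD donnees 1 []) i ""]
      PySem.List.pyRange 1 (donnees.length : Int) |>.foldl
        (fun dic2 j =>
          let v := PySem.List.pyGetD (PySem.List.pyGetD donnees j []) i ""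
          if v ∉ PySem.Dict.getD dic2 key [] ∧ v ≠ "?" then
            PySem.Dict.modify dic2 key [] (fun l => l ++ [v])
          else dic2)
        dic1)
    PySem.Dict.empty).items

-- ===== PORT B =====
def dicAttributs_alt (donnees : List (List String)) : List (String × List String) :=
  let m : Int := ((PySem.List.pyGetD donnees 0 []).length : Int) - 1
  if (donnees.length : Int) < 2 ∨ m < 1 then []
  else
    let state0 : List (List String × PySem.Set String) :=
      (PySem.List.slice (PySem.List.pyGetD donnees 1 []) none (some m)).map
        (fun v => ([v], PySem.Set.ofList [v]))
    let state := (PySem.List.slice donnees (some 2) none).foldl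
      (fun st row =>
        (st.zip row).map (fun p =>
          if p.2 ≠ "?" ∧ ¬ (PySem.Set.contains p.1.2 p.2 = true) then
            (p.1.1 ++ [p.2], PySem.Set.union p.1.2 [p.2])
          else p.1))
      state0
    (((PySem.List.pyGetD donnees 0 []).zip state).foldl
      (fun d p => PySem.Dict.insert d p.1 p.2.1) PySem.Dict.empty).items

-- ===== PRECONDITION & SPEC =====
-- Pre_ excludes exactly the inputs where the Python A raises IndexError: empty donnees, and a
-- header of ≥ 2 columns with fewer than two rows or with some row shorter than (#columns - 1).
def Pre_dicAttributs (donnees : List (List String)) : Prop :=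
  donnees ≠ [] ∧
    (2 ≤ (donnees.headD []).length →
      2 ≤ donnees.length ∧ ∀ row ∈ donnees, (donnees.headD []).length - 1 ≤ row.length)
instance (donnees : List (List String)) : Decidable (Pre_dicAttributs donnees) := by
  unfold Pre_dicAttributs; infer_instance
def pvWitness_dicAttributs : List (List String) :=
  [["a", "b", "cl"], ["x", "?", "y"], ["x", "z", "y"]]
def Spec_dicAttributs (donnees : List (List String)) (out : List (String × List String)) : Prop :=
  out = dicAttributs_alt donnees
instance (donnees : List (List String)) (out : List (String × List String)) :
    Decidable (Spec_dicAttributs donnees out) := by unfold Spec_dicAttributs; infer_instance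

-- ===== CLAIM (what is proved, stated in full; the proofs are below) =====
def Claim_equal_dicAttributs : Prop :=
  ∀ (donnees : List (List String)), Dom_dicAttributs donnees → Pre_dicAttributs donnees →
    Spec_dicAttributs donnees (dicAttributs donnees)

-- ===== LEMMAS AND PROOFS =====

-- A's per-column list update step (the value list kept at dic[key]).
def pvLStep (l : List String) (v : String) : List String :=
  if v ∉ l ∧ v ≠ "?" then l ++ [v] else l

-- B's per-column state update step.
def pvCStep (c : List String × PySem.Set String) (v : String) : List String × PySem.Set String :=
  if v ≠ "?" ∧ ¬ (PySem.Set.contains c.2 v = true) then (c.1 ++ [v], PySem.Set.union c.2 [v]) else c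

-- A's inner j-loop only rewrites the entry at `key`: it equals an insert of the list fold.
lemma pvInnerA (key : String) (g : Int → String) (js : List Int)
    (d : PySem.Dict String (List String)) (l0 : List String) :
    js.foldl
      (fun dic2 j =>
        if g j ∉ PySem.Dict.getD dic2 key [] ∧ g j ≠ "?" then
          PySem.Dict.modify dic2 key [] (fun l => l ++ [g j])
        else dic2)
      (PySem.Dict.insert d key l0)
    = PySem.Dict.insert d key (js.foldl (fun l j => pvLStep l (g j)) l0) := by
  induction js generalizing l0 with
  | nil => rfl
  | cons j js ih =>
    simp only [List.foldl_cons]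
    rw [show (if g j ∉ PySem.Dict.getD (PySem.Dict.insert d key l0) key [] ∧ g j ≠ "?" then
          PySem.Dict.modify (PySem.Dict.insert d key l0) key [] (fun l => l ++ [g j])
        else PySem.Dict.insert d key l0) = PySem.Dict.insert d key (pvLStep l0 (g j)) from ?_]
    · rw [ih]
    · unfold pvLStep PySem.Dict.modify
      rw [PySem.Dict.getD_insert_self]
      by_cases h : g j ∉ l0 ∧ g j ≠ "?"
      · rw [if_pos h, if_pos h, PySem.Dict.insert_insert_self]
      · rw [if_neg h, if_neg h]

-- B's seen-set mirrors membership in the value list, so B's per-column fold computes A's.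
lemma pvColFold (vs : List String) (vals : List String) (seen : PySem.Set String)
    (h : ∀ v, v ∈ seen ↔ v ∈ vals) :
    (vs.foldl pvCStep (vals, seen)).1 = vs.foldl pvLStep vals := by
  induction vs generalizing vals seen with
  | nil => rfl
  | cons v vs ih =>
    simp only [List.foldl_cons]
    by_cases hv : v ∈ vals
    · rw [show pvCStep (vals, seen) v = (vals, seen) from ?_,
        show pvLStep vals v = vals from ?_]
      · exact ih vals seen h
      · unfold pvLStep; rw [if_neg (by tauto)]
      · unfold pvCStep
        rw [if_neg]
        simp only [not_and, not_not, PySem.Set.contains, List.contains_iff_mem]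
        intro _
        simpa using (h v).mpr hv
    · by_cases hq : v = "?"
      · rw [show pvCStep (vals, seen) v = (vals, seen) from ?_,
          show pvLStep vals v = vals from ?_]
        · exact ih vals seen h
        · unfold pvLStep; rw [if_neg (by tauto)]
        · unfold pvCStep; rw [if_neg (by tauto)]
      · rw [show pvCStep (vals, seen) v = (vals ++ [v], PySem.Set.union seen [v]) from ?_,
          show pvLStep vals v = vals ++ [v] from ?_]
        · refine ih _ _ (fun w => ?_)
          rw [show PySem.Set.union seen [v] = PySem.Set.add seen v from rfl]
          rw [PySem.Set.mem_add]
          simp [h w]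
        · unfold pvLStep; rw [if_pos ⟨hv, hq⟩]
        · unfold pvCStep
          rw [if_pos]
          refine ⟨hq, ?_⟩
          simp only [PySem.Set.contains, List.contains_iff_mem]
          simpa using fun hw => hv ((h v).mp hw)

-- values of a tail of a list, as a pyRange fold
lemma pvMapPyRangeFrom {α : Type} (xs : List α) (d : α) (k : Nat) :
    (PySem.List.pyRange (k : Int) (xs.length : Int)).map (fun j => PySem.List.pyGetD xs j d)
      = xs.drop k := by
  by_cases hk : k < xs.length
  · rw [PySem.List.pyRange_one_cons (by exact_mod_cast hk)]
    have : ((k : Int) + 1) = ((k + 1 : Nat) : Int) := by push_cast; ring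
    rw [List.map_cons, this, pvMapPyRangeFrom xs d (k + 1)]
    rw [PySem.List.pyGetD_natCast, List.getD_eq_getElem xs d hk,
      List.drop_eq_getElem_cons hk]
  · rw [List.drop_eq_nil_of_le (by omega)]
    have : PySem.List.pyRange (k : Int) (xs.length : Int) = [] := by
      simp [PySem.List.pyRange]; omega
    simp [this]
termination_by xs.length - k

-- row-major fold read componentwise: column i of B's state fold is the per-column fold.
lemma pvStateLen (rows : List (List String)) (st : List (List String × PySem.Set String))
    (hr : ∀ r ∈ rows, st.length ≤ r.length) :
    (rows.foldl (fun st row => (st.zip row).map (fun p => pvCStep p.1 p.2)) st).length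
      = st.length := by
  induction rows generalizing st with
  | nil => rfl
  | cons row rows ih =>
    simp only [List.foldl_cons]
    rw [ih]
    · simp only [List.length_map, List.length_zip]
      exact Nat.min_eq_left (hr row (by simp))
    · intro r hrr
      simp only [List.length_map, List.length_zip, Nat.min_eq_left (hr row (by simp))]
      exact hr r (by simp [hrr])

lemma pvStateComp (rows : List (List String)) (st : List (List String × PySem.Set String))
    (hr : ∀ r ∈ rows, st.length ≤ r.length) (i : Nat) (hi : i < st.length) (dflt : _) :
    (rows.foldl (fun st row => (st.zip row).map (fun p => pvCStep p.1 p.2)) st).getD i dflt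
      = rows.foldl (fun c r => pvCStep c (r.getD i "")) (st.getD i dflt) := by
  induction rows generalizing st with
  | nil => rfl
  | cons row rows ih =>
    simp only [List.foldl_cons]
    have hlen : ((st.zip row).map (fun p => pvCStep p.1 p.2)).length = st.length := by
      simp only [List.length_map, List.length_zip]
      exact Nat.min_eq_left (hr row (by simp))
    rw [ih _ (by intro r hrr; rw [hlen]; exact hr r (by simp [hrr])) (by omega)]
    congr 1
    have hir : i < row.length := by have := hr row (by simp); omega
    have hiz : i < (st.zip row).length := by simp [List.length_zip]; omega
    rw [List.getD_eq_getElem _ _ (by omega), List.getD_eq_getElem _ _ hi,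
      List.getD_eq_getElem _ _ hir]
    simp [List.getElem_zip]

-- common normal form of both ports on a well-shaped input
def pvSpine (r0 r1 : List String) (rest : List (List String)) : List (String × List String) :=
  (((List.range (r0.length - 1)).map (fun k =>
      (r0.getD k "", (rest.map (fun r => r.getD k "")).foldl pvLStep [r1.getD k ""]))).foldl
    (fun d q => PySem.Dict.insert d q.1 q.2) PySem.Dict.empty).items

lemma pvA_norm (r0 r1 : List String) (rest : List (List String)) (h2 : 2 ≤ r0.length) :
    dicAttributs (r0 :: r1 :: rest) = pvSpine r0 r1 rest := by
  unfold dicAttributs pvSpine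
  have hr0 : PySem.List.pyGetD (r0 :: r1 :: rest) 0 [] = r0 := by simp [PySem.List.pyGetD]
  have hr1 : PySem.List.pyGetD (r0 :: r1 :: rest) 1 [] = r1 := by simp [PySem.List.pyGetD]
  rw [hr0, hr1]
  have hm : (r0.length : Int) - 1 = ((r0.length - 1 : Nat) : Int) := by omega
  rw [hm, PySem.List.pyRange_zero_natCast, List.foldl_map, List.foldl_map]
  congr 1
  refine PySem.List.foldl_congr_mem _ _ _ _ ?_
  intro dic k _
  dsimp only
  rw [pvInnerA (PySem.List.pyGetD r0 (↑k) "")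
    (fun j => PySem.List.pyGetD (PySem.List.pyGetD (r0 :: r1 :: rest) j []) (↑k) "")
    _ dic [PySem.List.pyGetD r1 (↑k) ""]]
  rw [← List.foldl_map
    (f := fun j => PySem.List.pyGetD (PySem.List.pyGetD (r0 :: r1 :: rest) j []) (↑k) "")
    (g := pvLStep)]
  rw [show (List.map
        (fun j => PySem.List.pyGetD (PySem.List.pyGetD (r0 :: r1 :: rest) j []) (↑k) "")
        (PySem.List.pyRange 1 ((r0 :: r1 :: rest).length : Int)))
      = List.map (fun r => PySem.List.pyGetD r (↑k) "")
          (List.map (fun j => PySem.List.pyGetD (r0 :: r1 :: rest) j [])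
            (PySem.List.pyRange 1 ((r0 :: r1 :: rest).length : Int))) from by rw [List.map_map]; rfl]
  rw [show PySem.List.pyRange 1 (((r0 :: r1 :: rest).length : Nat) : Int)
      = PySem.List.pyRange ((1 : Nat) : Int) (((r0 :: r1 :: rest).length : Nat) : Int) from rfl,
    pvMapPyRangeFrom]
  simp only [List.drop_succ_cons, List.drop_zero, List.map_cons, List.foldl_cons]
  rw [show pvLStep [PySem.List.pyGetD r1 (↑k) ""] (PySem.List.pyGetD r1 (↑k) "")
      = [PySem.List.pyGetD r1 (↑k) ""] from by unfold pvLStep; rw [if_neg (by simp)]]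
  simp only [PySem.List.pyGetD_natCast]

lemma pvB_norm (r0 r1 : List String) (rest : List (List String)) (h2 : 2 ≤ r0.length)
    (hr1 : r0.length - 1 ≤ r1.length) (hrest : ∀ r ∈ rest, r0.length - 1 ≤ r.length) :
    dicAttributs_alt (r0 :: r1 :: rest) = pvSpine r0 r1 rest := by
  unfold dicAttributs_alt pvSpine
  dsimp only
  have hr0g : PySem.List.pyGetD (r0 :: r1 :: rest) 0 [] = r0 := by simp [PySem.List.pyGetD]
  have hr1g : PySem.List.pyGetD (r0 :: r1 :: rest) 1 [] = r1 := by simp [PySem.List.pyGetD]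
  rw [hr0g, hr1g, if_neg (by simp only [List.length_cons, not_or, not_lt]; omega)]
  have hm : (r0.length : Int) - 1 = ((r0.length - 1 : Nat) : Int) := by omega
  rw [hm, PySem.List.slice_to _ (by positivity), Int.toNat_natCast,
    PySem.List.slice_from _ (by norm_num)]
  rw [show ((2 : Int).toNat) = 2 from rfl]
  simp only [List.drop_succ_cons, List.drop_zero]
  rw [show (fun (st : List (List String × PySem.Set String)) (row : List String) =>
        (st.zip row).map (fun p =>
          if p.2 ≠ "?" ∧ ¬ (PySem.Set.contains p.1.2 p.2 = true) then
            (p.1.1 ++ [p.2], PySem.Set.union p.1.2 [p.2])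
          else p.1))
      = (fun st row => (st.zip row).map (fun p => pvCStep p.1 p.2)) from rfl]
  congr 1
  rw [← List.foldl_map (f := fun p : String × (List String × PySem.Set String) => (p.1, p.2.1))
      (g := fun d q => PySem.Dict.insert d q.1 q.2)]
  congr 1
  have hlen0 : ((r1.take (r0.length - 1)).map
      (fun v => ([v], PySem.Set.ofList [v]))).length = r0.length - 1 := by
    simp [List.length_take]; omega
  have hrest' : ∀ r ∈ rest, ((r1.take (r0.length - 1)).map
      (fun v => ([v], PySem.Set.ofList [v]))).length ≤ r.length := by
    intro r hr; rw [hlen0]; exact hrest r hr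
  have hlenS : (rest.foldl (fun st row => (st.zip row).map (fun p => pvCStep p.1 p.2))
      ((r1.take (r0.length - 1)).map (fun v => ([v], PySem.Set.ofList [v])))).length
      = r0.length - 1 := by
    rw [pvStateLen _ _ hrest', hlen0]
  refine List.ext_getElem ?_ ?_
  · simp only [List.length_map, List.length_zip, List.length_range, hlenS]
    omega
  · intro i hi1 hi2
    simp only [List.length_map, List.length_range] at hi2
    have him : i < r0.length - 1 := by omega
    simp only [List.getElem_map, List.getElem_zip, List.getElem_range]
    have hstI : (rest.foldl (fun st row => (st.zip row).map (fun p => pvCStep p.1 p.2))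
        ((r1.take (r0.length - 1)).map (fun v => ([v], PySem.Set.ofList [v]))))[i]'(by omega)
        = (rest.map (fun r => r.getD i "")).foldl pvCStep
            ([r1.getD i ""], PySem.Set.ofList [r1.getD i ""]) := by
      rw [← List.getD_eq_getElem _ (([], []) : List String × PySem.Set String) (by omega),
        pvStateComp rest _ hrest' i (by omega),
        ← List.foldl_map (f := fun r : List String => r.getD i "") (g := pvCStep)]
      congr 1
      rw [List.getD_eq_getElem _ _ (by omega)]
      simp only [List.getElem_map, List.getElem_take]
      rw [List.getD_eq_getElem _ _ (by omega)]
    rw [hstI, pvColFold _ _ _ (fun v => by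
      simp [PySem.Set.ofList, PySem.Set.add, PySem.Set.empty, PySem.Set.contains])]
    rw [List.getD_eq_getElem _ _ (by omega), List.getD_eq_getElem r0 _ (by omega)]

-- ===== VERDICT (by name: the statement is the Claim_ definition above) =====
theorem dicAttributs_spec : Claim_equal_dicAttributs := by
  intro donnees _ hpre
  unfold Spec_dicAttributs
  obtain ⟨hne, hshape⟩ := hpre
  by_cases h2 : 2 ≤ (donnees.headD []).length
  · obtain ⟨hlen2, hrows⟩ := hshape h2
    match donnees, hlen2 with
    | r0 :: r1 :: rest, _ =>
      rw [pvA_norm r0 r1 rest (by simpa using h2),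
        pvB_norm r0 r1 rest (by simpa using h2)
          (by simpa using hrows r1 (by simp))
          (fun r hr => by simpa using hrows r (by simp [hr]))]
  · -- header of length ≤ 1: both programs return the empty dict
    match donnees, hne with
    | r0 :: tl, _ =>
      simp only [List.headD_cons, not_le] at h2
      unfold dicAttributs dicAttributs_alt
      have hr0 : PySem.List.pyGetD (r0 :: tl) 0 [] = r0 := by
        simp [PySem.List.pyGetD]
      rw [hr0]
      have : PySem.List.pyRange 0 ((r0.length : Int) - 1) = [] := by
        simp [PySem.List.pyRange]; omega
      rw [this, if_pos (by right; omega)]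
      rfl
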